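-- pv_equiv track=rewrite | github.com/Timsbim/AoC | 2021/day_20.py | add_frame
-- ===== SOURCE A (Python) =====
-- def add_frame(image, pad):
--     padding = pad
--     if not all(line[0] == pad for line in image):
--         padding += pad
--     image = [padding + line for line in image]
--     padding = pad
--     if not all(line[-1] == pad for line in image):
--         padding += pad
--     image = [line + padding for line in image]
--     padding = pad * len(image[0])
--     num_lines = 2
--     if not all(c == pad for c in image[0]):
--         num_lines += 1
--     image = [padding for _ in range(num_lines)] + image
--     padding = pad * len(image[-1])
--     num_lines = 2
--     if not all(c == pad for c in image[-1]):
--         num_lines += 1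
--     image =  image + [padding for _ in range(num_lines)]
--     return image
-- ===== SOURCE B (Python) =====
-- def add_frame(image, pad):
--     # Frame thicknesses, read once from the original grid (an empty line counts
--     # as pure padding), then the output is rendered row by row from its index.
--     height = len(image)
--     left = 1 if all(line[:1] == pad for line in image) else 2
--     right = 1 if all((line or pad)[-1:] == pad for line in image) else 2
--     top = 2 if set(pad + image[0]) <= {pad} else 3
--     bottom = 2 if set(pad + image[-1]) <= {pad} else 3
--     margin = (left + right) * len(pad)
--
--     def row(r):
--         if r < top:
--             return pad * (len(image[0]) + margin)
--         if r < top + height: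
--             return pad * left + image[r - top] + pad * right
--         return pad * (len(image[-1]) + margin)
--
--     return [row(r) for r in range(top + height + bottom)]
-- ===== Notes on version B (the rewrite author's own statement) =====
-- stated objective: alternative
-- what changed: B reads the four frame thicknesses once from the original grid (edge tests phrased as slice/character-set comparisons, an empty line counting as pure padding) and then renders the output row by row from the output row index, instead of A's four sequential whole-list rebuilds whose side conditions are re-read from the partially padded intermediate lists.
import Mathlib
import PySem

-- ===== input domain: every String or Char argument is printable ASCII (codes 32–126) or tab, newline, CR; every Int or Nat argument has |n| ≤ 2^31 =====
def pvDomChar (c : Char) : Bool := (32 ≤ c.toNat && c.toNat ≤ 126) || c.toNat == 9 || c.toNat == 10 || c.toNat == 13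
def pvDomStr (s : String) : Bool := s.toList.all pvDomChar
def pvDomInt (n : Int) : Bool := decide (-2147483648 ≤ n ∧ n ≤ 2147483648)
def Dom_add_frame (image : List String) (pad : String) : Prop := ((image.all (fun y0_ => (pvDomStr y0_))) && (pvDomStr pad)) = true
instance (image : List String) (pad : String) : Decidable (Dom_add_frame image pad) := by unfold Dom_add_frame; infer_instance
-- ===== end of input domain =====

-- B reads the four frame thicknesses once from the original grid and renders the output row
-- by row from the output row index, instead of A's four sequential whole-list rebuilds
-- (objective: alternative; same asymptotic cost).

-- ===== PORT A =====
-- A's code, step for step, on the character lists of the strings (the wrappers below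
-- convert String ↔ List Char; Python string concatenation/indexing is exact on lists).
-- `line[0] == pad` compares the 1-character string line[0] with pad: ported as [c] == pad.
def addFrameCharsA (img : List (List Char)) (pad : List Char) : List (List Char) :=
  -- padding = pad; if not all(line[0] == pad for line in image): padding += pad
  let padding1 := if img.all (fun line => (PySem.List.pyGet? line 0).map (fun c => [c]) == some pad)
                  then pad else pad ++ pad
  -- image = [padding + line for line in image]
  let img1 := img.map (fun line => padding1 ++ line)
  -- padding = pad; if not all(line[-1] == pad for line in image): padding += pad
  let padding2 := if img1.all (fun line => (PySem.List.pyGet? line (-1)).map (fun c => [c]) == some pad)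
                  then pad else pad ++ pad
  -- image = [line + padding for line in image]
  let img2 := img1.map (fun line => line ++ padding2)
  -- padding = pad * len(image[0]); num_lines = 2 (+1 unless image[0] is all pad)
  let first := PySem.List.pyGetD img2 0 []   -- image[0]; in range under Pre_
  let padding3 := PySem.List.pyRepeat pad (first.length : Int)
  let num1 : Nat := if first.all (fun c => [c] == pad) then 2 else 3
  -- image = [padding for _ in range(num_lines)] + image
  let img3 := List.replicate num1 padding3 ++ img2
  -- padding = pad * len(image[-1]); num_lines = 2 (+1 unless image[-1] is all pad)
  let last := PySem.List.pyGetD img3 (-1) []   -- image[-1]; in range under Pre_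
  let padding4 := PySem.List.pyRepeat pad (last.length : Int)
  let num2 : Nat := if last.all (fun c => [c] == pad) then 2 else 3
  -- image + [padding for _ in range(num_lines)]
  img3 ++ List.replicate num2 padding4

def add_frame (image : List String) (pad : String) : List String :=
  (addFrameCharsA (image.map String.toList) pad.toList).map String.ofList

-- ===== PORT B =====
-- Source B, step for step: scalar frame thicknesses from the original grid, then each output
-- row rendered from its index.  Python's truthiness `line or pad` is ported as
-- `if line = [] then pad else line`; the 1-character strings iterated by `set(...)` are
-- ported as the singleton lists [c].
def addFrameCharsB (img : List (List Char)) (pad : List Char) : List (List Char) :=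
  let height := img.length
  -- left = 1 if all(line[:1] == pad for line in image) else 2
  let left : Int := if img.all (fun line => PySem.List.slice line none (some 1) == pad) then 1 else 2
  -- right = 1 if all((line or pad)[-1:] == pad for line in image) else 2
  let right : Int := if img.all (fun line =>
      PySem.List.slice (if line = [] then pad else line) (some (-1)) none == pad) then 1 else 2
  let row0 := PySem.List.pyGetD img 0 []      -- image[0]; in range for nonempty image
  let rowN := PySem.List.pyGetD img (-1) []   -- image[-1]; in range for nonempty image
  -- top = 2 if set(pad + image[0]) <= {pad} else 3   (same for bottom with image[-1])
  let top : Nat := if PySem.Set.issubset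
      (PySem.Set.ofList ((pad ++ row0).map (fun c => ([c] : List Char))))
      (PySem.Set.ofList [pad]) then 2 else 3
  let bottom : Nat := if PySem.Set.issubset
      (PySem.Set.ofList ((pad ++ rowN).map (fun c => ([c] : List Char))))
      (PySem.Set.ofList [pad]) then 2 else 3
  -- margin = (left + right) * len(pad)
  let margin : Int := (left + right) * (pad.length : Int)
  -- def row(r): …
  let row : Nat → List Char := fun r =>
    if r < top then PySem.List.pyRepeat pad ((row0.length : Int) + margin)
    else if r < top + height then
      PySem.List.pyRepeat pad left
        ++ PySem.List.pyGetD img ((r : Int) - (top : Int)) []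
        ++ PySem.List.pyRepeat pad right
    else PySem.List.pyRepeat pad ((rowN.length : Int) + margin)
  -- [row(r) for r in range(top + height + bottom)]
  (List.range (top + height + bottom)).map row

def add_frame_alt (image : List String) (pad : String) : List String :=
  (addFrameCharsB (image.map String.toList) pad.toList).map String.ofList

-- ===== PRECONDITION & SPEC =====
-- Pre_ excludes exactly the inputs on which A raises IndexError: the empty image, and images
-- whose first empty line is not preceded by a line that fails the first-char test (only such
-- a failure short-circuits the all() before line[0] is read on the empty line).
def Pre_add_frame (image : List String) (pad : String) : Prop :=
  image ≠ [] ∧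
  (∀ i < image.length, image.getD i "" = "" →
     ∃ j < i, image.getD j "" ≠ "" ∧ (image.getD j "").toList.take 1 ≠ pad.toList)
instance (image : List String) (pad : String) : Decidable (Pre_add_frame image pad) := by
  unfold Pre_add_frame; infer_instance

def pvWitness_add_frame : List String × String := (["#.", ".."], ".")

def Spec_add_frame (image : List String) (pad : String) (out : List String) : Prop := out = add_frame_alt image pad
instance (image : List String) (pad : String) (out : List String) : Decidable (Spec_add_frame image pad out) := by unfold Spec_add_frame; infer_instance

-- ===== CLAIM (what is proved, stated in full; the proofs are below) =====
def Claim_equal_add_frame : Prop := ∀ (image : List String) (pad : String), Dom_add_frame image pad → Pre_add_frame image pad → Spec_add_frame image pad (add_frame image pad)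

-- ===== LEMMAS AND PROOFS =====

theorem all_congr_mem {α : Type} (l : List α) (f g : α → Bool)
    (h : ∀ x ∈ l, f x = g x) : l.all f = l.all g := by
  induction l with
  | nil => rfl
  | cons x t ih =>
      simp only [List.all_cons, h x (List.mem_cons_self),
        ih (fun y hy => h y (List.mem_cons_of_mem _ hy))]

-- xs[-1] of a nonempty list is its last element (Option form of PySem.List.pyGetD_neg_one)
theorem pyGet?_last {α : Type} (l : List α) (h : l ≠ []) :
    PySem.List.pyGet? l (-1) = some (l.getLast h) := by
  have hlen : 1 ≤ l.length := List.length_pos_iff.mpr h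
  simp only [PySem.List.pyGet?, PySem.List.pyIdx?]
  norm_num [hlen]
  simp [List.getLast_eq_getElem]

-- A's per-line first-char test equals B's line[:1] test on a nonempty line
theorem cond1_line (p l : List Char) (h : l ≠ []) :
    ((PySem.List.pyGet? l 0).map (fun c => [c]) == some p)
      = (PySem.List.slice l none (some 1) == p) := by
  obtain ⟨c, t, rfl⟩ := List.exists_cons_of_ne_nil h
  rw [PySem.List.slice_to _ (by norm_num)]
  have h1 : PySem.List.pyGet? (c :: t) 0 = some c := by
    simp [PySem.List.pyGet?, PySem.List.pyIdx?]
  rw [h1]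
  simp

-- A's whole first-char scan equals B's (the first line is nonempty under Pre_)
theorem cond1_all (p l0 : List Char) (rest : List (List Char)) (h00 : l0 ≠ []) :
    (l0 :: rest).all (fun line => (PySem.List.pyGet? line 0).map (fun c => [c]) == some p)
      = (l0 :: rest).all (fun line => PySem.List.slice line none (some 1) == p) := by
  by_cases hp : p = []
  · subst hp
    obtain ⟨c, t, rfl⟩ := List.exists_cons_of_ne_nil h00
    have h1 : PySem.List.pyGet? (c :: t) 0 = some c := by
      simp [PySem.List.pyGet?, PySem.List.pyIdx?]
    rw [List.all_cons, List.all_cons, h1, PySem.List.slice_to _ (by norm_num)]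
    simp
  · refine all_congr_mem _ _ _ (fun l _ => ?_)
    rcases eq_or_ne l [] with rfl | hne
    · have : PySem.List.slice ([] : List Char) none (some 1) = [] := by
        rw [PySem.List.slice_to _ (by norm_num)]; rfl
      rw [this]
      simp [PySem.List.pyGet?, PySem.List.pyIdx?]
      exact hp
    · exact cond1_line p l hne

-- A's per-line last-char test (on the left-padded line) equals B's (line or pad)[-1:] test
theorem cond2_line (p pd l : List Char) (h : l ≠ []) :
    ((PySem.List.pyGet? (pd ++ l) (-1)).map (fun c => [c]) == some p)
      = (PySem.List.slice l (some (-1)) none == p) := by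
  have hne : pd ++ l ≠ [] := by simp [h]
  rw [pyGet?_last _ hne, List.getLast_append_of_ne_nil hne h,
      PySem.List.slice_from_neg_one, List.drop_length_sub_one h]
  simp

-- A's whole last-char scan (over the left-padded lines) equals B's
theorem cond2_all (p pd l0 : List Char) (rest : List (List Char)) (h00 : l0 ≠ [])
    (hpd : pd = p ∨ pd = p ++ p) :
    ((l0 :: rest).map (fun line => pd ++ line)).all
        (fun line => (PySem.List.pyGet? line (-1)).map (fun c => [c]) == some p)
      = (l0 :: rest).all (fun line =>
          PySem.List.slice (if line = [] then p else line) (some (-1)) none == p) := by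
  rw [List.all_map]
  by_cases hp : p = []
  · subst hp
    have hpd0 : pd = [] := by rcases hpd with rfl | rfl <;> rfl
    subst hpd0
    rw [List.all_cons, List.all_cons]
    simp only [Function.comp, List.nil_append]
    rw [pyGet?_last l0 h00, if_neg h00, PySem.List.slice_from_neg_one,
        List.drop_length_sub_one h00]
    simp
  · have hpne : p ≠ [] := hp
    have hpdne : pd ≠ [] := by rcases hpd with rfl | rfl <;> simp [hpne]
    refine all_congr_mem _ _ _ (fun l _ => ?_)
    rcases eq_or_ne l [] with rfl | hne
    · simp only [Function.comp, List.append_nil, reduceIte]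
      rw [pyGet?_last pd hpdne, PySem.List.slice_from_neg_one, List.drop_length_sub_one hpne]
      have : pd.getLast hpdne = p.getLast hpne := by
        rcases hpd with rfl | rfl
        · rfl
        · exact List.getLast_append_of_ne_nil (by simp [hpne]) hpne
      rw [this]
      simp
    · simp only [Function.comp, if_neg hne]
      exact cond2_line p pd l hne

-- A's all-pad test on a framed row equals B's character-set test on pad + original row
theorem frame_cond (p l pd1 pd2 : List Char)
    (h1 : pd1 = p ∨ pd1 = p ++ p) (h2 : pd2 = p ∨ pd2 = p ++ p) :
    ((pd1 ++ l) ++ pd2).all (fun c => [c] == p)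
      = PySem.Set.issubset
          (PySem.Set.ofList ((p ++ l).map (fun c => ([c] : List Char))))
          (PySem.Set.ofList [p]) := by
  have hR : PySem.Set.issubset
      (PySem.Set.ofList ((p ++ l).map (fun c => ([c] : List Char))))
      (PySem.Set.ofList [p]) = (p ++ l).all (fun c => [c] == p) := by
    apply Bool.eq_iff_iff.mpr
    simp [PySem.Set.issubset_iff, List.all_eq_true]
    constructor
    · intro h
      exact ⟨fun x hx => h [x] (Or.inl ⟨x, hx, rfl⟩), fun x hx => h [x] (Or.inr ⟨x, hx, rfl⟩)⟩
    · rintro ⟨ha, hb⟩ x (⟨a, ha', rfl⟩ | ⟨a, hb', rfl⟩)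
      · exact ha a ha'
      · exact hb a hb'
  rw [hR]
  have hpd : ∀ pd : List Char, pd = p ∨ pd = p ++ p →
      pd.all (fun c => [c] == p) = p.all (fun c => [c] == p) := by
    rintro pd (rfl | rfl)
    · rfl
    · rw [List.all_append, Bool.and_self]
  simp only [List.all_append, hpd pd1 h1, hpd pd2 h2]
  cases p.all (fun c => [c] == p) <;> cases l.all (fun c => [c] == p) <;> rfl

-- a map over range(t+h+b) split into its three constant-or-shifted pieces
theorem range_map_piecewise {α : Type} (t h b : Nat) (f : Nat → α) (F0 FN : α) (m : Nat → α)
    (h0 : ∀ r < t, f r = F0)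
    (h1 : ∀ j < h, f (t + j) = m j)
    (h2 : ∀ j < b, f (t + h + j) = FN) :
    (List.range (t + h + b)).map f
      = List.replicate t F0 ++ (List.range h).map m ++ List.replicate b FN := by
  rw [List.range_add, List.range_add, List.map_append, List.map_append, List.map_map,
      List.map_map]
  congr 1
  · congr 1
    · calc (List.range t).map f = (List.range t).map (fun _ => F0) :=
            List.map_congr_left (fun r hr => h0 r (List.mem_range.mp hr))
        _ = List.replicate t F0 := by simp [List.map_const']
    · exact List.map_congr_left (fun j hj => h1 j (List.mem_range.mp hj))
  · calc (List.range b).map (f ∘ fun x => t + h + x)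
        = (List.range b).map (fun _ => FN) :=
          List.map_congr_left (fun j hj => h2 j (List.mem_range.mp hj))
      _ = List.replicate b FN := by simp [List.map_const']

-- indexing a list over range of its length is the list itself
theorem range_map_getD {α β : Type} (img : List α) (d : α) (g : α → β) :
    (List.range img.length).map (fun j => g (img.getD j d)) = img.map g := by
  apply List.ext_getElem
  · simp
  · intro i h1' h2'
    simp only [List.getElem_map, List.getElem_range] at *
    rw [List.getD_eq_getElem img d (by simpa using h1')]

theorem core_eq (l0 : List Char) (rest : List (List Char)) (p : List Char)
    (h00 : l0 ≠ []) :
    addFrameCharsA (l0 :: rest) p = addFrameCharsB (l0 :: rest) p := by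
  simp only [addFrameCharsA, addFrameCharsB]
  rw [cond1_all p l0 rest h00]
  set b1 := (l0 :: rest).all (fun line => PySem.List.slice line none (some 1) == p) with hb1
  set P1 : List Char := if b1 then p else p ++ p with hP1
  set L : Int := if b1 then 1 else 2 with hL
  have hP1or : P1 = p ∨ P1 = p ++ p := by rw [hP1]; rcases b1 <;> simp
  rw [cond2_all p P1 l0 rest h00 hP1or]
  set b2 := (l0 :: rest).all (fun line =>
      PySem.List.slice (if line = [] then p else line) (some (-1)) none == p) with hb2
  set P2 : List Char := if b2 then p else p ++ p with hP2
  set R : Int := if b2 then 1 else 2 with hR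
  have hP2or : P2 = p ∨ P2 = p ++ p := by rw [hP2]; rcases b2 <;> simp
  have hrepL : PySem.List.pyRepeat p L = P1 := by
    rw [hL, hP1]; rcases b1 <;> simp [PySem.List.pyRepeat]
  have hrepR : PySem.List.pyRepeat p R = P2 := by
    rw [hR, hP2]; rcases b2 <;> simp [PySem.List.pyRepeat]
  have hlenL : (P1.length : Int) = (p.length : Int) * L := by
    rw [hL, hP1]; rcases b1 <;> simp <;> ring
  have hlenR : (P2.length : Int) = (p.length : Int) * R := by
    rw [hR, hP2]; rcases b2 <;> simp <;> ring
  clear_value b1 b2 P1 P2 L R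
  clear hb1 hb2 hP1 hP2 hL hR
  -- compose the two maps of A into one
  have hmaps : ((l0 :: rest).map (fun line => P1 ++ line)).map (fun line => line ++ P2)
             = (l0 :: rest).map (fun line => (P1 ++ line) ++ P2) := by
    simp [List.map_map, Function.comp]
  rw [hmaps, List.map_cons, PySem.List.pyGetD_zero_cons, PySem.List.pyGetD_zero_cons]
  -- A's image[-1] after prepending the top rows is the framed last original line
  have h2ne : ((P1 ++ l0) ++ P2) :: rest.map (fun line => (P1 ++ line) ++ P2) ≠ [] := by simp
  have h3ne : ∀ n X, List.replicate n X ++ (((P1 ++ l0) ++ P2) :: rest.map (fun line => (P1 ++ line) ++ P2)) ≠ ([] : List (List Char)) := by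
    intro n X; simp
  have hlast : ∀ n X, PySem.List.pyGetD (List.replicate n X ++ (((P1 ++ l0) ++ P2) :: rest.map (fun line => (P1 ++ line) ++ P2))) (-1) ([] : List Char)
      = (P1 ++ (l0 :: rest).getLast (by simp)) ++ P2 := by
    intro n X
    rw [PySem.List.pyGetD_neg_one _ _ (h3ne n X),
        List.getLast_append_of_ne_nil (h3ne n X) h2ne]
    exact List.getLast_map (f := fun line => (P1 ++ line) ++ P2) (l := l0 :: rest) (by simp)
  rw [hlast]
  rw [PySem.List.pyGetD_neg_one _ _ (by simp : (l0 :: rest) ≠ [])]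
  -- the two edge-row conditions agree
  rw [frame_cond p l0 P1 P2 hP1or hP2or,
      frame_cond p ((l0 :: rest).getLast (by simp)) P1 P2 hP1or hP2or]
  -- name the agreed scalars
  set top : Nat := if PySem.Set.issubset
      (PySem.Set.ofList ((p ++ l0).map (fun c => ([c] : List Char))))
      (PySem.Set.ofList [p]) then 2 else 3 with htop
  set bottom : Nat := if PySem.Set.issubset
      (PySem.Set.ofList ((p ++ (l0 :: rest).getLast (by simp)).map (fun c => ([c] : List Char))))
      (PySem.Set.ofList [p]) then 2 else 3 with hbottom
  -- the edge filler rows agree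
  have hlen0 : ((((P1 ++ l0) ++ P2).length : Nat) : Int)
      = (l0.length : Int) + (L + R) * (p.length : Int) := by
    push_cast [List.length_append]
    rw [hlenL, hlenR]; ring
  have hlenN : ((((P1 ++ (l0 :: rest).getLast (by simp)) ++ P2).length : Nat) : Int)
      = (((l0 :: rest).getLast (by simp)).length : Int) + (L + R) * (p.length : Int) := by
    push_cast [List.length_append]
    rw [hlenL, hlenR]; ring
  rw [hlen0, hlenN]
  -- B's range-rendered rows are the replicate/map/replicate assembly
  rw [range_map_piecewise top ((l0 :: rest).length) bottom _
      (PySem.List.pyRepeat p ((l0.length : Int) + (L + R) * (p.length : Int)))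
      (PySem.List.pyRepeat p ((((l0 :: rest).getLast (by simp)).length : Int) + (L + R) * (p.length : Int)))
      (fun j => PySem.List.pyRepeat p L ++ (l0 :: rest).getD j [] ++ PySem.List.pyRepeat p R)
      (fun r hr => by simp [hr])
      (fun j hj => by
        have hnlt : ¬ (top + j < top) := by omega
        have hlt : top + j < top + (l0 :: rest).length := by omega
        have hidx : ((top + j : Nat) : Int) - (top : Int) = ((j : Nat) : Int) := by push_cast; ring
        simp only [hnlt, hlt, if_false, if_true, hidx, PySem.List.pyGetD_natCast])
      (fun j hj => by
        have h1' : ¬ (top + (l0 :: rest).length + j < top) := by omega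
        have h2' : ¬ (top + (l0 :: rest).length + j < top + (l0 :: rest).length) := by omega
        simp only [h1', h2', if_false])]
  rw [range_map_getD (l0 :: rest) []
      (fun l => PySem.List.pyRepeat p L ++ l ++ PySem.List.pyRepeat p R)]
  simp only [hrepL, hrepR]
  simp [List.append_assoc]

theorem toList_ne_nil_of_ne_empty (s : String) (h : s ≠ "") : s.toList ≠ [] := by
  intro hnil
  apply h
  have := congrArg String.ofList hnil
  simpa [String.ofList_toList] using this

-- ===== VERDICT (by name: the statement is the Claim_ definition above) =====
theorem add_frame_spec : Claim_equal_add_frame := by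
  intro image pad _ hpre
  obtain ⟨h0, hscan⟩ := hpre
  obtain ⟨s, t, rfl⟩ := List.exists_cons_of_ne_nil h0
  unfold Spec_add_frame add_frame add_frame_alt
  rw [List.map_cons]
  have hs : s ≠ "" := by
    intro hse
    obtain ⟨j, hj, -⟩ := hscan 0 (by simp) (by simpa using hse)
    omega
  rw [core_eq _ _ _ (toList_ne_nil_of_ne_empty s hs)]
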